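-- pv_equiv track=rewrite | github.com/LittleEndu/Codeforces | Python/Unsorted/509c.py | first_digit
-- ===== SOURCE A (Python) =====
-- def sum_all_digits(nr):
--     ss = 0
--     while nr > 0:
--         ss += nr % 10
--         nr //= 10
--     return ss
--
-- def first_digit(sumo_digits, bigger=0):
--     if bigger != 0:
--         real_first = first_digit(sumo_digits)
--         while (real_first * 10 <= bigger):
--             real_first *= 10
--         if sumo_digits == 1:
--             while (real_first * 10 <= (bigger - 1) * 10):
--                 real_first *= 10
--     else:
--         real_first = 0
--
--     while (sum_all_digits(real_first) != sumo_digits or real_first < bigger):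
--         index = 0
--         while sumo_digits - 9 >= sum_all_digits(real_first):
--             real_first += 10 ** index * 9
--             index += 1
--         if (sum_all_digits(real_first) != sumo_digits or real_first < bigger):
--             real_first += 1
--     return real_first
-- ===== SOURCE B (Python) =====
-- def digit_sum(n):
--     return 0 if n <= 0 else n % 10 + digit_sum(n // 10)
--
-- def first_digit(sumo_digits, bigger=0):
--     lo = bigger if bigger > 0 else 0
--     if digit_sum(lo) == sumo_digits:
--         return lo
--     k = 0
--     while True:
--         p = lo // 10 ** (k + 1)          # digits of lo strictly above position k
--         cur = lo // 10 ** k % 10         # digit of lo at position k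
--         d = max(cur + 1, sumo_digits - digit_sum(p) - 9 * k)
--         if d <= 9 and d <= sumo_digits - digit_sum(p):
--             rem = sumo_digits - digit_sum(p) - d
--             nines = rem // 9
--             return (p * 10 + d) * 10 ** k + (rem - 9 * nines) * 10 ** nines + 10 ** nines - 1
--         k += 1
-- ===== Notes on version B (the rewrite author's own statement) =====
-- stated objective: faster
-- what changed: Replaces A's accelerated trial search (recursive self-call, two power-of-10 scaling loops, 9-filling inner loop, +1 stepping) by a direct greedy construction: scan change positions k upward, raise the digit of max(bigger,0) at the first feasible position and fill the suffix with the minimal digit string of the remaining digit sum.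
import Mathlib
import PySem

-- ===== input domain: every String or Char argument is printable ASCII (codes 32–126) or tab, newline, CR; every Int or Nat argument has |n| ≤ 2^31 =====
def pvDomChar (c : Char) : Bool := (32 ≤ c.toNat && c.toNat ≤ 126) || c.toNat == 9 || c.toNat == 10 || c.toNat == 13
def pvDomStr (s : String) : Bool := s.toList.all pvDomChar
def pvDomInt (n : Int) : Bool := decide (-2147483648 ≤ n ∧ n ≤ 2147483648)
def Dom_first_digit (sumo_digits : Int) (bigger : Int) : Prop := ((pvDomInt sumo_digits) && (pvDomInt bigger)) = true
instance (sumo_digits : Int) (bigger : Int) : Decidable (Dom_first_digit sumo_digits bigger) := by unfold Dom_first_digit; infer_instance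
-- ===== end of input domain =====

-- B replaces A's accelerated trial search (recursive self-call, scaling loops, 9-filling,
-- +1 stepping) by a direct greedy digit construction of the answer; objective: faster.
-- Python's while-loops are ported with an explicit fuel counter as a totality guard only
-- (outside Pre_ the Python loops diverge); on Pre_ the fuel is proved large enough.

-- ===== PORT A =====
-- sum_all_digits: while nr > 0: ss += nr % 10; nr //= 10
def sumAllDigitsGo (nr : Int) (ss : Int) : Int :=
  if h : 0 < nr then sumAllDigitsGo (PySem.Int.floordiv nr 10) (ss + PySem.Int.mod nr 10) else ss
termination_by nr.toNat
decreasing_by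
  rw [PySem.Int.floordiv_eq_ediv_of_pos (by norm_num)]
  omega

def sumAllDigitsA (nr : Int) : Int := sumAllDigitsGo nr 0

def fuelA (s b : Int) : Nat := 10 ^ (s.natAbs + b.natAbs + 2)

-- inner loop: while sumo_digits - 9 >= sum_all_digits(real_first): real_first += 10**index * 9; index += 1
-- (Python's `index` starts at 0 and is only incremented, so it is kept as a Nat; `10 ** index` is exact.)
def innerA (f : Nat) (s r : Int) (idx : Nat) : Int :=
  match f with
  | 0 => r
  | f + 1 =>
    if s - 9 ≥ sumAllDigitsA r then innerA f s (r + 10 ^ idx * 9) (idx + 1) else r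

-- outer loop: while sum_all_digits(real_first) != sumo_digits or real_first < bigger: …
def outerA (f : Nat) (fi : Nat) (s b r : Int) : Int :=
  match f with
  | 0 => r
  | f + 1 =>
    if sumAllDigitsA r ≠ s ∨ r < b then
      let v := innerA fi s r 0
      if sumAllDigitsA v ≠ s ∨ v < b then outerA f fi s b (v + 1) else outerA f fi s b v
    else r

-- while real_first * 10 <= bigger: real_first *= 10
def scale1A (f : Nat) (b r : Int) : Int :=
  match f with
  | 0 => r
  | f + 1 => if r * 10 ≤ b then scale1A f b (r * 10) else r

-- while real_first * 10 <= (bigger - 1) * 10: real_first *= 10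
def scale2A (f : Nat) (b r : Int) : Int :=
  match f with
  | 0 => r
  | f + 1 => if r * 10 ≤ (b - 1) * 10 then scale2A f b (r * 10) else r

def first_digit (sumo_digits : Int) (bigger : Int) : Int :=
  if h : bigger ≠ 0 then
    let r1 := first_digit sumo_digits 0
    let r2 := scale1A (fuelA sumo_digits bigger) bigger r1
    let r3 := if sumo_digits = 1 then scale2A (fuelA sumo_digits bigger) bigger r2 else r2
    outerA (fuelA sumo_digits bigger) (fuelA sumo_digits bigger) sumo_digits bigger r3
  else
    outerA (fuelA sumo_digits bigger) (fuelA sumo_digits bigger) sumo_digits bigger 0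
termination_by bigger.natAbs
decreasing_by simpa using Int.natAbs_pos.mpr h

-- ===== PORT B =====
-- digit_sum(n) = 0 if n <= 0 else n % 10 + digit_sum(n // 10)
def digitSumB (n : Int) : Int :=
  if h : n ≤ 0 then 0 else PySem.Int.mod n 10 + digitSumB (PySem.Int.floordiv n 10)
termination_by n.toNat
decreasing_by
  rw [PySem.Int.floordiv_eq_ediv_of_pos (by norm_num)]
  omega

-- the `while True` loop of B: position k's digit is raised, the suffix is filled greedily.
-- `k` starts at 0 and is only incremented, so it is a Nat; `nines >= 0` always holds in the
-- taken branch (rem >= 0), so `10 ** nines` is `10 ^ nines.toNat`, exact.  The loop carries a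
-- fuel counter as a totality guard only (the Python loop never returns when sumo_digits <= 0 < lo).
def searchB (f : Nat) (s lo : Int) (k : Nat) : Int :=
  match f with
  | 0 => 0
  | f + 1 =>
    let p := PySem.Int.floordiv lo (10 ^ (k + 1))
    let cur := PySem.Int.mod (PySem.Int.floordiv lo (10 ^ k)) 10
    let d := max (cur + 1) (s - digitSumB p - 9 * (k : Int))
    if d ≤ 9 ∧ d ≤ s - digitSumB p then
      let rem := s - digitSumB p - d
      let nines := PySem.Int.floordiv rem 9
      (p * 10 + d) * 10 ^ k + (rem - 9 * nines) * 10 ^ nines.toNat + 10 ^ nines.toNat - 1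
    else searchB f s lo (k + 1)

def first_digit_alt (sumo_digits : Int) (bigger : Int) : Int :=
  let lo := if bigger > 0 then bigger else 0
  if digitSumB lo = sumo_digits then lo
  else searchB (10 ^ (sumo_digits.natAbs + bigger.natAbs + 2)) sumo_digits lo 0

-- ===== PRECONDITION & SPEC =====
-- Pre_ excludes sumo_digits < 0 and (sumo_digits = 0 with bigger > 0): on those inputs the
-- Python A loops forever and returns nothing (B's Python loops forever there too).
def Pre_first_digit (sumo_digits : Int) (bigger : Int) : Prop :=
  1 ≤ sumo_digits ∨ (sumo_digits = 0 ∧ bigger ≤ 0)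
instance (sumo_digits : Int) (bigger : Int) : Decidable (Pre_first_digit sumo_digits bigger) := by
  unfold Pre_first_digit; infer_instance

def pvWitness_first_digit : Int × Int := (5, 23)

def Spec_first_digit (sumo_digits : Int) (bigger : Int) (out : Int) : Prop := out = first_digit_alt sumo_digits bigger
instance (sumo_digits : Int) (bigger : Int) (out : Int) : Decidable (Spec_first_digit sumo_digits bigger out) := by
  unfold Spec_first_digit; infer_instance

-- ===== CLAIM (what is proved, stated in full; the proofs are below) =====
def Claim_equal_first_digit : Prop := ∀ (sumo_digits : Int) (bigger : Int), Dom_first_digit sumo_digits bigger → Pre_first_digit sumo_digits bigger → Spec_first_digit sumo_digits bigger (first_digit sumo_digits bigger)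

-- ===== LEMMAS AND PROOFS =====

-- digit sum on Nat (proof-side model of both Pythons' digit sums)
def SD (n : Nat) : Nat :=
  if n = 0 then 0 else n % 10 + SD (n / 10)
termination_by n
decreasing_by omega

lemma SD_zero : SD 0 = 0 := by rw [SD]; norm_num

lemma SD_rec (n : Nat) : SD n = n % 10 + SD (n / 10) := by
  by_cases h : n = 0
  · subst h; rw [SD]; simp [SD_zero]
  · rw [SD]; simp [h]

lemma SD_mul10 (x : Nat) : SD (x * 10) = SD x := by
  rcases Nat.eq_zero_or_pos x with h | h
  · simp [h]
  · rw [SD_rec (x * 10)]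
    simp [Nat.mul_mod_left, Nat.mul_div_cancel]

lemma SD_mul_pow (x j : Nat) : SD (x * 10 ^ j) = SD x := by
  induction j with
  | zero => simp
  | succ j ih =>
    rw [pow_succ, ← mul_assoc, SD_mul10, ih]

lemma SD_split (i h m : Nat) (hm : m < 10 ^ i) : SD (h * 10 ^ i + m) = SD h + SD m := by
  induction i generalizing h m with
  | zero => interval_cases m <;> simp [SD_zero]
  | succ i ih =>
    have h10 : (0:Nat) < 10 := by norm_num
    have hrw : h * 10 ^ (i + 1) + m = m + (h * 10 ^ i) * 10 := by ring
    have hmod : (h * 10 ^ (i + 1) + m) % 10 = m % 10 := by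
      rw [hrw, Nat.add_mul_mod_self_right]
    have hdiv : (h * 10 ^ (i + 1) + m) / 10 = h * 10 ^ i + m / 10 := by
      rw [hrw, Nat.add_mul_div_right _ _ h10, Nat.add_comm]
    rw [SD_rec (h * 10 ^ (i + 1) + m), hmod, hdiv,
        ih h (m / 10) (by
          have : m < 10 ^ i * 10 := by rw [← pow_succ]; exact hm
          omega), SD_rec m]
    omega

lemma SD_le (i m : Nat) (hm : m < 10 ^ i) : SD m ≤ 9 * i := by
  induction i generalizing m with
  | zero => interval_cases m <;> simp [SD_zero]
  | succ i ih =>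
    rw [SD_rec m]
    have hdiv : m / 10 < 10 ^ i := by
      have : m < 10 ^ i * 10 := by rw [← pow_succ]; exact hm
      omega
    have := ih (m / 10) hdiv
    omega

lemma SD_all9 (i : Nat) : SD (10 ^ i - 1) = 9 * i := by
  induction i with
  | zero => simp [SD_zero]
  | succ i ih =>
    have hpos : (1:Nat) ≤ 10 ^ i := Nat.one_le_pow _ _ (by norm_num)
    have hrw : 10 ^ (i + 1) - 1 = (10 ^ i - 1) * 10 + 9 := by
      have : 10 ^ (i + 1) = 10 ^ i * 10 := pow_succ 10 i
      omega
    rw [hrw, SD_rec]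
    have hmod : ((10 ^ i - 1) * 10 + 9) % 10 = 9 := by omega
    have hdiv : ((10 ^ i - 1) * 10 + 9) / 10 = 10 ^ i - 1 := by omega
    rw [hmod, hdiv, ih]
    ring

lemma SD_lt (i m : Nat) (hm : m < 10 ^ i - 1) : SD m < 9 * i := by
  induction i generalizing m with
  | zero => simp at hm
  | succ i ih =>
    have hpos : (1:Nat) ≤ 10 ^ i := Nat.one_le_pow _ _ (by norm_num)
    have hp : 10 ^ (i + 1) = 10 ^ i * 10 := pow_succ 10 i
    rw [SD_rec m]
    by_cases hd : m / 10 < 10 ^ i - 1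
    · have := ih (m / 10) hd
      omega
    · have hle : m / 10 = 10 ^ i - 1 := by omega
      have hm9 : m % 10 < 9 := by omega
      rw [hle, SD_all9]
      omega

-- trailing nines
def TN (h : Nat) : Nat :=
  if h % 10 = 9 then TN (h / 10) + 1 else 0
termination_by h
decreasing_by omega

lemma SD_succ (h : Nat) : SD h + 1 = SD (h + 1) + 9 * TN h ∧ 10 ^ TN h ∣ (h + 1) := by
  induction h using Nat.strong_induction_on with
  | _ h ih =>
    by_cases h9 : h % 10 = 9
    · have hpos : 0 < h := by omega
      have ihh := ih (h / 10) (by omega)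
      have hrw : h + 1 = (h / 10 + 1) * 10 := by omega
      have hTN : TN h = TN (h / 10) + 1 := by rw [TN]; simp [h9]
      constructor
      · rw [hrw, SD_mul10, SD_rec h, h9, hTN]
        omega
      · rw [hrw, hTN, pow_succ]
        exact mul_dvd_mul ihh.2 dvd_rfl
    · have hTN : TN h = 0 := by rw [TN]; simp [h9]
      constructor
      · have hmod : (h + 1) % 10 = h % 10 + 1 := by omega
        have hdiv : (h + 1) / 10 = h / 10 := by omega
        rw [hTN, SD_rec (h + 1), hmod, hdiv, SD_rec h]
        omega
      · simp [hTN]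

lemma SD_add_le (h j : Nat) : SD (h + j) ≤ SD h + j := by
  induction j with
  | zero => simp
  | succ j ih =>
    have hx := (SD_succ (h + j)).1
    have hassoc : h + (j + 1) = (h + j) + 1 := by ring
    rw [hassoc]
    omega

lemma SD_eq_zero (n : Nat) : SD n = 0 ↔ n = 0 := by
  constructor
  · intro hnz
    by_contra h0
    induction n using Nat.strong_induction_on with
    | _ n ih =>
      rw [SD_rec n] at hnz
      rcases Nat.eq_zero_or_pos n with h | h
      · exact h0 h
      · by_cases hq : n / 10 = 0
        · omega
        · exact ih (n / 10) (by omega) (by omega) hq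
  · intro h; subst h; exact SD_zero

lemma SD_eq_one (n : Nat) (h1 : SD n = 1) : ∃ u, n = 10 ^ u := by
  induction n using Nat.strong_induction_on with
  | _ n ih =>
    have hn0 : n ≠ 0 := by
      intro h; rw [h, SD_zero] at h1; omega
    rw [SD_rec n] at h1
    by_cases hm : n % 10 = 1
    · have : SD (n / 10) = 0 := by omega
      have := (SD_eq_zero _).1 this
      exact ⟨0, by omega⟩
    · have hm0 : n % 10 = 0 := by omega
      have hs : SD (n / 10) = 1 := by omega
      obtain ⟨u, hu⟩ := ih (n / 10) (by omega) hs
      exact ⟨u + 1, by rw [pow_succ]; omega⟩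

-- repunit, for the existence of a valid number
def RepU : Nat → Nat
  | 0 => 0
  | k + 1 => 10 * RepU k + 1

lemma SD_RepU (k : Nat) : SD (RepU k) = k := by
  induction k with
  | zero => simp [RepU, SD_zero]
  | succ k ih =>
    show SD (10 * RepU k + 1) = k + 1
    rw [SD_rec]
    have hmod : (10 * RepU k + 1) % 10 = 1 := by omega
    have hdiv : (10 * RepU k + 1) / 10 = RepU k := by omega
    rw [hmod, hdiv, ih]
    omega

lemma RepU_lt_pow (k : Nat) : RepU k < 10 ^ k := by
  induction k with
  | zero => simp [RepU]
  | succ k ih =>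
    show 10 * RepU k + 1 < 10 ^ (k + 1)
    have : 10 ^ (k + 1) = 10 ^ k * 10 := pow_succ 10 k
    omega

lemma RepU_pos (k : Nat) (hk : 1 ≤ k) : 1 ≤ RepU k := by
  cases k with
  | zero => omega
  | succ k => show 1 ≤ 10 * RepU k + 1; omega

-- bridges: the two ported digit sums compute SD
lemma sumGo_eq (nr ss : Int) : sumAllDigitsGo nr ss = ss + (SD nr.toNat : Int) := by
  by_cases h : 0 < nr
  · rw [sumAllDigitsGo]
    simp only [h, dite_true]
    obtain ⟨m, hm⟩ : ∃ m : Nat, nr = (m : Int) := ⟨nr.toNat, by omega⟩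
    subst hm
    have hf : PySem.Int.floordiv (m : Int) 10 = ((m / 10 : Nat) : Int) := by
      exact_mod_cast PySem.Int.floordiv_natCast m 10
    have hg : PySem.Int.mod (m : Int) 10 = ((m % 10 : Nat) : Int) := by
      exact_mod_cast PySem.Int.mod_natCast m 10
    rw [hf, hg, sumGo_eq]
    simp only [Int.toNat_natCast]
    rw [SD_rec m]
    push_cast
    omega
  · rw [sumAllDigitsGo]
    simp only [h, dite_false]
    have : nr.toNat = 0 := by omega
    rw [this, SD_zero]
    simp
termination_by nr.toNat
decreasing_by omega

lemma sumA_cast (m : Nat) : sumAllDigitsA (m : Int) = (SD m : Int) := by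
  rw [sumAllDigitsA, sumGo_eq]
  simp

lemma digitSumB_eq (n : Int) : digitSumB n = (SD n.toNat : Int) := by
  by_cases h : n ≤ 0
  · rw [digitSumB]
    simp only [h, dite_true]
    have h0 : n.toNat = 0 := by omega
    rw [h0, SD_zero]
    simp
  · rw [digitSumB]
    simp only [h, dite_false]
    obtain ⟨m, hm⟩ : ∃ m : Nat, n = (m : Int) := ⟨n.toNat, by omega⟩
    subst hm
    have hf : PySem.Int.floordiv (m : Int) 10 = ((m / 10 : Nat) : Int) := by
      exact_mod_cast PySem.Int.floordiv_natCast m 10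
    have hg : PySem.Int.mod (m : Int) 10 = ((m % 10 : Nat) : Int) := by
      exact_mod_cast PySem.Int.mod_natCast m 10
    rw [hf, hg, digitSumB_eq]
    simp only [Int.toNat_natCast]
    rw [SD_rec m]
    push_cast
    omega
termination_by n.toNat
decreasing_by omega

lemma digitSumB_cast (m : Nat) : digitSumB (m : Int) = (SD m : Int) := by
  rw [digitSumB_eq]
  simp

-- the loop condition of A's inner loop, and the outer-loop invariant
def condI (s : Int) (r0 : Nat) (j : Nat) : Prop := ((SD (r0 + 10 ^ j - 1) : Int) ≤ s - 9)

def INVr (s : Int) (r0 : Nat) : Prop := ∀ i : Nat, (∀ j ≤ i, condI s r0 j) → 10 ^ (i + 1) ∣ r0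

lemma noskip (t i r0 : Nat) (hd : 10 ^ i ∣ r0) (hc : SD (r0 + 10 ^ i - 1) + 9 ≤ t) :
    ∀ n, r0 ≤ n → n < r0 + 10 ^ (i + 1) - 1 → SD n < t := by
  intro n hn1 hn2
  have hPpos : 0 < 10 ^ i := pow_pos (by norm_num) i
  have hPP : 10 ^ (i + 1) = 10 ^ i * 10 := pow_succ 10 i
  obtain ⟨h, hh⟩ := hd
  have hh' : r0 = h * 10 ^ i := by rw [hh, mul_comm]
  have hq1 : h ≤ n / 10 ^ i := by
    apply (Nat.le_div_iff_mul_le hPpos).mpr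
    omega
  have hq2 : n / 10 ^ i ≤ h + 9 := by
    have hlt : n < (h + 10) * 10 ^ i := by
      have hexp : (h + 10) * 10 ^ i = h * 10 ^ i + 10 * 10 ^ i := by ring
      have hPP' : 10 ^ (i + 1) = 10 * 10 ^ i := by rw [pow_succ]; ring
      omega
    have := (Nat.div_lt_iff_lt_mul hPpos).mpr hlt
    omega
  have hsplit : SD n = SD (n / 10 ^ i) + SD (n % 10 ^ i) := by
    conv_lhs => rw [show n = n / 10 ^ i * 10 ^ i + n % 10 ^ i from (Nat.div_add_mod' n (10 ^ i)).symm]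
    exact SD_split i _ _ (Nat.mod_lt _ hPpos)
  have hSq : SD (n / 10 ^ i) ≤ SD h + (n / 10 ^ i - h) := by
    have := SD_add_le h (n / 10 ^ i - h)
    have heq : h + (n / 10 ^ i - h) = n / 10 ^ i := by omega
    rw [heq] at this
    exact this
  have hch : SD h + 9 * i + 9 ≤ t := by
    have he : r0 + 10 ^ i - 1 = h * 10 ^ i + (10 ^ i - 1) := by omega
    have := SD_split i h (10 ^ i - 1) (by omega)
    rw [he, this, SD_all9] at hc
    omega
  by_cases hm : n % 10 ^ i = 10 ^ i - 1
  · have hq3 : n / 10 ^ i ≤ h + 8 := by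
      by_contra hcon
      have hq : n / 10 ^ i = h + 9 := by omega
      have he := Nat.div_add_mod' n (10 ^ i)
      rw [hq] at he
      have hx : (h + 9) * 10 ^ i = h * 10 ^ i + 9 * 10 ^ i := by ring
      have hPP' : 10 ^ (i + 1) = 10 * 10 ^ i := by rw [pow_succ]; ring
      omega
    have h9 : SD (n % 10 ^ i) = 9 * i := by rw [hm, SD_all9]
    omega
  · have hmlt : n % 10 ^ i < 10 ^ i - 1 := by
      have := Nat.mod_lt n hPpos
      omega
    have hSm : SD (n % 10 ^ i) < 9 * i := SD_lt i _ hmlt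
    omega

lemma INV_next (s : Int) (r0 k : Nat) (hdvd : 10 ^ k ∣ r0) (hnc : ¬ condI s r0 k) :
    INVr s (r0 + 10 ^ k) := by
  obtain ⟨h, hh⟩ := hdvd
  have hh' : r0 = h * 10 ^ k := by rw [hh, mul_comm]
  have hP1 : (1:Nat) ≤ 10 ^ k := Nat.one_le_pow _ _ (by norm_num)
  have hsucc := SD_succ h
  obtain ⟨m, hm⟩ := hsucc.2
  have hm' : h + 1 = m * 10 ^ TN h := by rw [hm, mul_comm]
  have hval : SD (r0 + 10 ^ k - 1) = SD h + 9 * k := by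
    have he : r0 + 10 ^ k - 1 = h * 10 ^ k + (10 ^ k - 1) := by omega
    rw [he, SD_split k h _ (by omega), SD_all9]
  unfold condI at hnc
  rw [hval] at hnc
  have hstart : r0 + 10 ^ k = m * 10 ^ (k + TN h) := by
    have h1 : r0 + 10 ^ k = (h + 1) * 10 ^ k := by
      rw [hh']; ring
    rw [h1, hm', pow_add]; ring
  have hP2 : (1:Nat) ≤ 10 ^ (k + TN h) := Nat.one_le_pow _ _ (by norm_num)
  have hnc2 : ¬ condI s (r0 + 10 ^ k) (k + TN h) := by
    unfold condI
    have he : r0 + 10 ^ k + 10 ^ (k + TN h) - 1 = m * 10 ^ (k + TN h) + (10 ^ (k + TN h) - 1) := by omega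
    have hv2 : SD (r0 + 10 ^ k + 10 ^ (k + TN h) - 1) = SD m + 9 * (k + TN h) := by
      rw [he, SD_split (k + TN h) m _ (by omega), SD_all9]
    rw [hv2]
    have hSm : SD (h + 1) = SD m := by
      rw [hm', SD_mul_pow]
    have hs1 := hsucc.1
    push_cast at hnc ⊢
    omega
  intro i hch
  have hik : i < k + TN h := by
    by_contra hcon
    push_neg at hcon
    exact hnc2 (hch (k + TN h) hcon)
  rw [hstart]
  exact Dvd.dvd.mul_left (pow_dvd_pow 10 (by omega)) m

lemma exists_k (s : Int) (hs : 1 ≤ s) (r0 : Nat) (hINV : INVr s r0) :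
    ∃ k, k ≤ s.toNat ∧ (∀ j < k, condI s r0 j) ∧ ¬ condI s r0 k := by
  have hdec : DecidablePred (fun j => ¬ condI s r0 j) := by
    intro j; unfold condI; infer_instance
  by_cases hall : ∀ j ≤ s.toNat, condI s r0 j
  · exfalso
    have hdvd := hINV s.toNat (fun j hj => hall j hj)
    have hdvd' : 10 ^ s.toNat ∣ r0 := dvd_trans (pow_dvd_pow 10 (Nat.le_succ _)) hdvd
    obtain ⟨h, hh⟩ := hdvd'
    have hh' : r0 = h * 10 ^ s.toNat := by rw [hh, mul_comm]
    have hP1 : (1:Nat) ≤ 10 ^ s.toNat := Nat.one_le_pow _ _ (by norm_num)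
    have hct := hall s.toNat le_rfl
    unfold condI at hct
    have he : r0 + 10 ^ s.toNat - 1 = h * 10 ^ s.toNat + (10 ^ s.toNat - 1) := by omega
    rw [he, SD_split _ h _ (by omega), SD_all9] at hct
    push_cast at hct
    omega
  · push_neg at hall
    obtain ⟨j, hj, hnc⟩ := hall
    have hex : ∃ j, ¬ condI s r0 j := ⟨j, hnc⟩
    refine ⟨@Nat.find _ hdec hex, ?_, ?_, @Nat.find_spec _ hdec hex⟩
    · exact le_trans (@Nat.find_min' _ hdec hex j hnc) hj
    · intro j' hj'
      have := @Nat.find_min _ hdec hex j' hj'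
      exact not_not.mp this

lemma INV_of_not_cond0 (s : Int) (r0 : Nat) (h : ¬ condI s r0 0) : INVr s r0 := by
  intro i hch
  exact absurd (hch 0 (Nat.zero_le i)) h

-- the common target: the least n with SD n = t and b' ≤ n
lemma existsValid (t b' : Nat) (ht : 1 ≤ t) : ∃ n, SD n = t ∧ b' ≤ n := by
  refine ⟨RepU t * 10 ^ (b' + 1), ?_, ?_⟩
  · rw [SD_mul_pow, SD_RepU]
  · have h1 : b' + 1 < 10 ^ (b' + 1) := Nat.lt_pow_self (by norm_num)
    have h2 : 1 ≤ RepU t := RepU_pos t ht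
    have h3 : 10 ^ (b' + 1) ≤ RepU t * 10 ^ (b' + 1) := Nat.le_mul_of_pos_left _ h2
    omega

def NN (t b' : Nat) (ht : 1 ≤ t) : Nat := Nat.find (existsValid t b' ht)

lemma NN_spec (t b' : Nat) (ht : 1 ≤ t) : SD (NN t b' ht) = t ∧ b' ≤ NN t b' ht :=
  Nat.find_spec (existsValid t b' ht)

lemma NN_min (t b' : Nat) (ht : 1 ≤ t) {n : Nat} (h : SD n = t ∧ b' ≤ n) : NN t b' ht ≤ n :=
  Nat.find_min' (existsValid t b' ht) h

lemma NN_bound (t b' : Nat) (ht : 1 ≤ t) : NN t b' ht < 10 ^ (t + b' + 1) := by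
  have h1 := NN_min t b' ht (n := RepU t * 10 ^ (b' + 1)) (by
    constructor
    · rw [SD_mul_pow, SD_RepU]
    · have h1 : b' + 1 < 10 ^ (b' + 1) := Nat.lt_pow_self (by norm_num)
      have h3 : 10 ^ (b' + 1) ≤ RepU t * 10 ^ (b' + 1) :=
        Nat.le_mul_of_pos_left _ (RepU_pos t ht)
      omega)
  have h2 : RepU t * 10 ^ (b' + 1) < 10 ^ t * 10 ^ (b' + 1) :=
    mul_lt_mul_of_pos_right (RepU_lt_pow t) (pow_pos (by norm_num) _)
  have h3 : 10 ^ t * 10 ^ (b' + 1) = 10 ^ (t + b' + 1) := by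
    rw [← pow_add]; ring_nf
  omega

-- evaluation of A's inner loop
lemma innerA_run (s : Int) (r0 k : Nat) (hc : ∀ j < k, condI s r0 j) (hnc : ¬ condI s r0 k) :
    ∀ f i, i ≤ k → k - i ≤ f → innerA f s ((r0 + 10 ^ i - 1 : Nat) : Int) i = ((r0 + 10 ^ k - 1 : Nat) : Int) := by
  unfold condI at hc hnc
  intro f
  induction f with
  | zero =>
    intro i hik hf
    have : i = k := by omega
    subst this
    rfl
  | succ f ih =>
    intro i hik hf
    simp only [innerA, sumA_cast, ge_iff_le]
    by_cases hik2 : i = k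
    · subst hik2
      rw [if_neg hnc]
    · have hlt : i < k := by omega
      rw [if_pos (hc i hlt)]
      have h1 : (1:Nat) ≤ 10 ^ i := Nat.one_le_pow _ _ (by norm_num)
      have harg : ((r0 + 10 ^ i - 1 : Nat) : Int) + 10 ^ i * 9 = ((r0 + 10 ^ (i + 1) - 1 : Nat) : Int) := by
        have h2 : (10:Nat) ^ (i + 1) = 10 * 10 ^ i := by rw [pow_succ]; ring
        have hip : ((10:Int) ^ i) = ((10 ^ i : Nat) : Int) := by push_cast; ring
        rw [hip]
        omega
      rw [harg]
      exact ih (i + 1) (by omega) (by omega)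

-- the outer-loop exit test, read through the Nat model
lemma bad_iff (s b : Int) (hs : 1 ≤ s) (n : Nat) :
    (sumAllDigitsA (n : Int) ≠ s ∨ (n : Int) < b) ↔ ¬ (SD n = s.toNat ∧ b.toNat ≤ n) := by
  rw [sumA_cast]
  omega

-- evaluation of A's outer loop
lemma outerA_run (s b : Int) (hs : 1 ≤ s) (ht : 1 ≤ s.toNat) :
    ∀ f fi (r0 : Nat), INVr s r0 → r0 ≤ NN s.toNat b.toNat ht → NN s.toNat b.toNat ht + 1 - r0 ≤ f →
      s.toNat ≤ fi → outerA f fi s b (r0 : Int) = ((NN s.toNat b.toNat ht : Nat) : Int) := by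
  intro f
  induction f with
  | zero =>
    intro fi r0 hINV hrN hfuel hfi
    omega
  | succ f ih =>
    intro fi r0 hINV hrN hfuel hfi
    simp only [outerA]
    by_cases hval : SD r0 = s.toNat ∧ b.toNat ≤ r0
    · have hr0N : r0 = NN s.toNat b.toNat ht := le_antisymm hrN (NN_min _ _ _ hval)
      rw [if_neg (fun hb => ((bad_iff s b hs r0).mp hb) hval), hr0N]
    · rw [if_pos ((bad_iff s b hs r0).mpr hval)]
      obtain ⟨k, hkt, hc, hnc⟩ := exists_k s hs r0 hINV
      have hP1 : (1:Nat) ≤ 10 ^ k := Nat.one_le_pow _ _ (by norm_num)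
      have hinner : innerA fi s ((r0 : Nat) : Int) 0 = ((r0 + 10 ^ k - 1 : Nat) : Int) := by
        have h0 : ((r0 + 10 ^ 0 - 1 : Nat) : Int) = ((r0 : Nat) : Int) := by norm_num
        rw [← h0]
        exact innerA_run s r0 k hc hnc fi 0 (Nat.zero_le k) (by omega)
      rw [hinner]
      have hdvdk : 10 ^ k ∣ r0 := by
        cases k with
        | zero => simp
        | succ k' => exact hINV k' (fun j hj => hc j (by omega))
      have hnoskip : ∀ n, r0 ≤ n → n < r0 + 10 ^ k - 1 → SD n < s.toNat := by
        cases k with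
        | zero =>
          intro n hx1 hx2
          omega
        | succ k' =>
          have hdvd' : 10 ^ k' ∣ r0 := dvd_trans (pow_dvd_pow _ (Nat.le_succ k')) hdvdk
          have hck' := hc k' (Nat.lt_succ_self k')
          unfold condI at hck'
          have hcnat : SD (r0 + 10 ^ k' - 1) + 9 ≤ s.toNat := by omega
          exact noskip s.toNat k' r0 hdvd' hcnat
      have hvN : r0 + 10 ^ k - 1 ≤ NN s.toNat b.toNat ht := by
        by_contra hcon
        push_neg at hcon
        have hx := hnoskip (NN s.toNat b.toNat ht) hrN hcon
        have hy := (NN_spec s.toNat b.toNat ht).1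
        omega
      by_cases hvv : SD (r0 + 10 ^ k - 1) = s.toNat ∧ b.toNat ≤ r0 + 10 ^ k - 1
      · have hveq : r0 + 10 ^ k - 1 = NN s.toNat b.toNat ht :=
          le_antisymm hvN (NN_min _ _ _ hvv)
        rw [if_neg (fun hb => ((bad_iff s b hs _).mp hb) hvv), hveq]
        have hr0lt : r0 < NN s.toNat b.toNat ht := by
          rcases lt_or_eq_of_le hrN with h | h
          · exact h
          · exact absurd (h ▸ NN_spec s.toNat b.toNat ht) hval
        apply ih fi (NN s.toNat b.toNat ht) ?_ le_rfl (by omega) hfi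
        apply INV_of_not_cond0
        unfold condI
        have h0 : NN s.toNat b.toNat ht + 10 ^ 0 - 1 = NN s.toNat b.toNat ht := by norm_num
        rw [h0, (NN_spec s.toNat b.toNat ht).1]
        omega
      · rw [if_pos ((bad_iff s b hs _).mpr hvv)]
        have hvlt : r0 + 10 ^ k - 1 < NN s.toNat b.toNat ht := by
          rcases lt_or_eq_of_le hvN with h | h
          · exact h
          · exact absurd (h ▸ NN_spec s.toNat b.toNat ht) hvv
        have hINV' : INVr s (r0 + 10 ^ k) := INV_next s r0 k hdvdk hnc
        have hcast : (((r0 + 10 ^ k - 1 : Nat) : Int) + 1) = ((r0 + 10 ^ k : Nat) : Int) := by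
          omega
        rw [hcast]
        exact ih fi (r0 + 10 ^ k) hINV' (by omega) (by omega) hfi

lemma scale1A_run (b : Int) :
    ∀ (f : Nat) (r : Int), 1 ≤ r → b - r ≤ (f : Int) →
      ∃ j : Nat, scale1A f b r = r * 10 ^ j ∧ b < r * 10 ^ j * 10 ∧ (j = 0 ∨ r * 10 ^ j ≤ b) := by
  intro f
  induction f with
  | zero =>
    intro r hr hf
    refine ⟨0, by simp [scale1A], ?_, Or.inl rfl⟩
    simp only [pow_zero, mul_one]
    push_cast at hf
    omega
  | succ f ih =>
    intro r hr hf
    simp only [scale1A]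
    by_cases hcond : r * 10 ≤ b
    · rw [if_pos hcond]
      obtain ⟨j, h1, h2, h3⟩ := ih (r * 10) (by omega) (by push_cast at hf ⊢; omega)
      have hpow : r * 10 ^ (j + 1) = r * 10 * 10 ^ j := by rw [pow_succ]; ring
      refine ⟨j + 1, ?_, ?_, Or.inr ?_⟩
      · rw [h1, hpow]
      · rw [hpow]; exact h2
      · rcases h3 with h3 | h3
        · subst h3; rw [pow_one]; exact hcond
        · rw [hpow]; exact h3
    · rw [if_neg hcond]
      refine ⟨0, by simp, ?_, Or.inl rfl⟩
      simp only [pow_zero, mul_one]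
      omega

lemma scale2A_run (b : Int) :
    ∀ (f : Nat) (r : Int), 1 ≤ r → (b - 1) * 10 - r ≤ (f : Int) →
      ∃ j : Nat, scale2A f b r = r * 10 ^ j ∧ (b - 1) * 10 < r * 10 ^ j * 10 ∧ (j = 0 ∨ r * 10 ^ j ≤ (b - 1) * 10) := by
  intro f
  induction f with
  | zero =>
    intro r hr hf
    refine ⟨0, by simp [scale2A], ?_, Or.inl rfl⟩
    simp only [pow_zero, mul_one]
    push_cast at hf
    omega
  | succ f ih =>
    intro r hr hf
    simp only [scale2A]
    by_cases hcond : r * 10 ≤ (b - 1) * 10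
    · rw [if_pos hcond]
      obtain ⟨j, h1, h2, h3⟩ := ih (r * 10) (by omega) (by push_cast at hf ⊢; omega)
      have hpow : r * 10 ^ (j + 1) = r * 10 * 10 ^ j := by rw [pow_succ]; ring
      refine ⟨j + 1, ?_, ?_, Or.inr ?_⟩
      · rw [h1, hpow]
      · rw [hpow]; exact h2
      · rcases h3 with h3 | h3
        · subst h3; rw [pow_one]; exact hcond
        · rw [hpow]; exact h3
    · rw [if_neg hcond]
      refine ⟨0, by simp, ?_, Or.inl rfl⟩
      simp only [pow_zero, mul_one]
      omega

-- ===== B-side: the greedy construction =====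
-- position-k data of the lower bound lo
def PkN (lo k : Nat) : Nat := lo / 10 ^ (k + 1)
def CkN (lo k : Nat) : Nat := lo / 10 ^ k % 10
-- B's loop condition at position k, in the Nat model
def feasN (t lo k : Nat) : Prop :=
  CkN lo k ≤ 8 ∧ t ≤ SD (PkN lo k) + 9 + 9 * k ∧ CkN lo k + 1 + SD (PkN lo k) ≤ t
-- B's chosen digit, remaining sum, greedy suffix, and result at position k
def dNf (t lo k : Nat) : Nat := max (CkN lo k + 1) (t - SD (PkN lo k) - 9 * k)
def remN (t lo k : Nat) : Nat := t - SD (PkN lo k) - dNf t lo k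
def tailN (r : Nat) : Nat := (r - 9 * (r / 9)) * 10 ^ (r / 9) + 10 ^ (r / 9) - 1
def resN (t lo k : Nat) : Nat := (PkN lo k * 10 + dNf t lo k) * 10 ^ k + tailN (remN t lo k)

lemma SD_digit (e : Nat) (he : e ≤ 9) : SD e = e := by
  rw [SD_rec]
  have h1 : e % 10 = e := by omega
  have h2 : e / 10 = 0 := by omega
  rw [h1, h2, SD_zero]
  omega

lemma SD_split10 (p d : Nat) (hd : d ≤ 9) : SD (p * 10 + d) = SD p + d := by
  have h := SD_split 1 p d (by simpa using (show d < 10 by omega))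
  simpa [SD_digit d hd] using h

lemma tail_SD (r : Nat) : SD (tailN r) = r := by
  unfold tailN
  have h1 : (1:Nat) ≤ 10 ^ (r / 9) := Nat.one_le_pow _ _ (by norm_num)
  have hrw : (r - 9 * (r / 9)) * 10 ^ (r / 9) + 10 ^ (r / 9) - 1
      = (r - 9 * (r / 9)) * 10 ^ (r / 9) + (10 ^ (r / 9) - 1) := by omega
  rw [hrw, SD_split _ _ _ (by omega), SD_all9, SD_digit _ (by omega)]
  omega

lemma tail_lt (r k : Nat) (h : r ≤ 9 * k) : tailN r < 10 ^ k := by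
  unfold tailN
  have hni : r / 9 ≤ k := by omega
  have h1 : (1:Nat) ≤ 10 ^ (r / 9) := Nat.one_le_pow _ _ (by norm_num)
  have hmul := Nat.mul_le_mul_right (10 ^ (r / 9)) (show r - 9 * (r / 9) ≤ 8 by omega)
  have hp : (10:Nat) ^ (r / 9 + 1) ≤ 10 ^ k ∨ r / 9 = k := by
    rcases Nat.lt_or_ge (r / 9) k with h' | h'
    · exact Or.inl (Nat.pow_le_pow_right (by norm_num) (by omega))
    · exact Or.inr (by omega)
  have hp2 : (10:Nat) ^ (r / 9 + 1) = 10 * 10 ^ (r / 9) := by rw [pow_succ]; ring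
  rcases hp with hp | hp
  · omega
  · have hr9 : r - 9 * (r / 9) = 0 := by omega
    rw [hr9, hp]
    have h2 : (1:Nat) ≤ 10 ^ k := Nat.one_le_pow _ _ (by norm_num)
    omega

lemma tail_min (r x : Nat) (hx : SD x = r) : tailN r ≤ x := by
  unfold tailN
  have h1 : (1:Nat) ≤ 10 ^ (r / 9) := Nat.one_le_pow _ _ (by norm_num)
  have hpos : (0:Nat) < 10 ^ (r / 9) := h1
  by_contra hcon
  push_neg at hcon
  have hsp : SD x = SD (x / 10 ^ (r / 9)) + SD (x % 10 ^ (r / 9)) := by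
    conv_lhs => rw [show x = x / 10 ^ (r / 9) * 10 ^ (r / 9) + x % 10 ^ (r / 9) from
      (Nat.div_add_mod' x (10 ^ (r / 9))).symm]
    exact SD_split _ _ _ (Nat.mod_lt _ hpos)
  have hq : x / 10 ^ (r / 9) ≤ r - 9 * (r / 9) := by
    by_contra hq2
    push_neg at hq2
    have h3 := Nat.div_mul_le_self x (10 ^ (r / 9))
    have h4 : (r - 9 * (r / 9) + 1) * 10 ^ (r / 9) ≤ x / 10 ^ (r / 9) * 10 ^ (r / 9) :=
      Nat.mul_le_mul_right _ (by omega)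
    have h5 : (r - 9 * (r / 9) + 1) * 10 ^ (r / 9) = (r - 9 * (r / 9)) * 10 ^ (r / 9) + 10 ^ (r / 9) := by
      ring
    omega
  rcases lt_or_eq_of_le hq with hq1 | hq1
  · have hsd : SD (x / 10 ^ (r / 9)) = x / 10 ^ (r / 9) := SD_digit _ (by omega)
    have hm : SD (x % 10 ^ (r / 9)) ≤ 9 * (r / 9) := SD_le _ _ (Nat.mod_lt _ hpos)
    omega
  · have hxe : x = (r - 9 * (r / 9)) * 10 ^ (r / 9) + x % 10 ^ (r / 9) := by
      conv_lhs => rw [show x = x / 10 ^ (r / 9) * 10 ^ (r / 9) + x % 10 ^ (r / 9) from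
        (Nat.div_add_mod' x (10 ^ (r / 9))).symm]
      rw [← hq1]
    have hmlt : x % 10 ^ (r / 9) < 10 ^ (r / 9) - 1 := by omega
    have hlt := SD_lt (r / 9) _ hmlt
    have hsd : SD (x / 10 ^ (r / 9)) = x / 10 ^ (r / 9) := SD_digit _ (by omega)
    omega

-- rounding lo up at coarser scales only grows
lemma roundlem (lo j J : Nat) (h : j ≤ J) :
    lo / 10 ^ j * 10 ^ j + 10 ^ j ≤ lo / 10 ^ J * 10 ^ J + 10 ^ J := by
  have hsplit : lo / 10 ^ j / 10 ^ (J - j) = lo / 10 ^ J := by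
    rw [Nat.div_div_eq_div_mul, ← pow_add]
    congr 2
    omega
  set M := lo / 10 ^ j % 10 ^ (J - j) with hM
  have hd := Nat.div_add_mod' (lo / 10 ^ j) (10 ^ (J - j))
  rw [hsplit] at hd
  have hm : M ≤ 10 ^ (J - j) - 1 := by
    have := Nat.mod_lt (lo / 10 ^ j) (y := 10 ^ (J - j)) (pow_pos (by norm_num) _)
    omega
  have hJ : (10:Nat) ^ J = 10 ^ (J - j) * 10 ^ j := by
    rw [← pow_add]
    congr 1
    omega
  have h1 : (1:Nat) ≤ 10 ^ (J - j) := Nat.one_le_pow _ _ (by norm_num)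
  calc lo / 10 ^ j * 10 ^ j + 10 ^ j
      = lo / 10 ^ J * (10 ^ (J - j) * 10 ^ j) + M * 10 ^ j + 10 ^ j := by
        rw [← hd]; ring
    _ ≤ lo / 10 ^ J * (10 ^ (J - j) * 10 ^ j) + (10 ^ (J - j) - 1) * 10 ^ j + 10 ^ j := by
        have := Nat.mul_le_mul_right (10 ^ j) hm
        omega
    _ = lo / 10 ^ J * (10 ^ (J - j) * 10 ^ j) + 10 ^ (J - j) * 10 ^ j := by
        have hsub : (10 ^ (J - j) - 1) * 10 ^ j = 10 ^ (J - j) * 10 ^ j - 10 ^ j := by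
          rw [Nat.sub_mul, one_mul]
        have hge : 10 ^ j ≤ 10 ^ (J - j) * 10 ^ j := Nat.le_mul_of_pos_left _ (by omega)
        omega
    _ = lo / 10 ^ J * 10 ^ J + 10 ^ J := by rw [hJ]

lemma lo_split (lo k : Nat) : lo / 10 ^ k = PkN lo k * 10 + CkN lo k := by
  unfold PkN CkN
  have h1 : lo / 10 ^ (k + 1) = lo / 10 ^ k / 10 := by
    rw [Nat.div_div_eq_div_mul, ← pow_succ]
  rw [h1]
  omega

lemma res_facts (t lo k : Nat) (hf : feasN t lo k) :
    SD (resN t lo k) = t ∧ lo < resN t lo k ∧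
      resN t lo k < PkN lo k * 10 ^ (k + 1) + 10 ^ (k + 1) := by
  obtain ⟨h8, hub, hlb⟩ := hf
  have hP1 : (1:Nat) ≤ 10 ^ k := Nat.one_le_pow _ _ (by norm_num)
  have hd9 : dNf t lo k ≤ 9 := by unfold dNf; omega
  have hdle : dNf t lo k ≤ t - SD (PkN lo k) := by unfold dNf; omega
  have hdc : CkN lo k < dNf t lo k := by unfold dNf; omega
  have hrem : remN t lo k ≤ 9 * k := by unfold remN dNf; omega
  have htlt := tail_lt _ _ hrem
  have htsd := tail_SD (remN t lo k)
  constructor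
  · unfold resN
    rw [SD_split _ _ _ htlt, SD_split10 _ _ hd9, htsd]
    unfold remN
    omega
  constructor
  · have hlo := Nat.div_add_mod' lo (10 ^ k)
    have hmlt : lo % 10 ^ k < 10 ^ k := Nat.mod_lt _ (by omega)
    have hls := lo_split lo k
    have hmul : (PkN lo k * 10 + CkN lo k + 1) * 10 ^ k ≤ (PkN lo k * 10 + dNf t lo k) * 10 ^ k :=
      Nat.mul_le_mul_right _ (by omega)
    have hexp : (PkN lo k * 10 + CkN lo k + 1) * 10 ^ k
        = (PkN lo k * 10 + CkN lo k) * 10 ^ k + 10 ^ k := by ring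
    have hql : lo / 10 ^ k * 10 ^ k = (PkN lo k * 10 + CkN lo k) * 10 ^ k := by rw [hls]
    unfold resN
    omega
  · unfold resN
    have hexp : (PkN lo k * 10 + dNf t lo k + 1) * 10 ^ k
        = (PkN lo k * 10 + dNf t lo k) * 10 ^ k + 10 ^ k := by ring
    have hexp2 : (PkN lo k * 10 + 10) * 10 ^ k = PkN lo k * 10 ^ (k + 1) + 10 ^ (k + 1) := by
      rw [pow_succ]; ring
    have hmul : (PkN lo k * 10 + dNf t lo k + 1) * 10 ^ k ≤ (PkN lo k * 10 + 10) * 10 ^ k :=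
      Nat.mul_le_mul_right _ (by omega)
    omega

lemma exists_K (lo n : Nat) (hne : n ≠ lo) :
    ∃ K, n / 10 ^ (K + 1) = lo / 10 ^ (K + 1) ∧ n / 10 ^ K ≠ lo / 10 ^ K := by
  have hex : ∃ j, n / 10 ^ j = lo / 10 ^ j := by
    refine ⟨n + lo, ?_⟩
    have h1 : n < 10 ^ (n + lo) := lt_of_lt_of_le (Nat.lt_pow_self (by norm_num))
      (Nat.pow_le_pow_right (by norm_num) (by omega))
    have h2 : lo < 10 ^ (n + lo) := lt_of_lt_of_le (Nat.lt_pow_self (by norm_num))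
      (Nat.pow_le_pow_right (by norm_num) (by omega))
    rw [Nat.div_eq_of_lt h1, Nat.div_eq_of_lt h2]
  have hj0 := Nat.find_spec hex
  have hj0pos : Nat.find hex ≠ 0 := by
    intro h
    rw [h] at hj0
    simp at hj0
    exact hne hj0
  refine ⟨Nat.find hex - 1, ?_, ?_⟩
  · have h1 : Nat.find hex - 1 + 1 = Nat.find hex := by omega
    rw [h1]
    exact hj0
  · exact Nat.find_min hex (by omega)

lemma K_gt (lo n K : Nat) (hgt : lo < n) (h1 : n / 10 ^ (K + 1) = lo / 10 ^ (K + 1))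
    (h2 : n / 10 ^ K ≠ lo / 10 ^ K) : lo / 10 ^ K < n / 10 ^ K := by
  rcases lt_trichotomy (n / 10 ^ K) (lo / 10 ^ K) with h | h | h
  · exfalso
    have hp : (0:Nat) < 10 ^ K := pow_pos (by norm_num) _
    have ha := Nat.div_add_mod' n (10 ^ K)
    have hb := Nat.div_add_mod' lo (10 ^ K)
    have hc : n % 10 ^ K < 10 ^ K := Nat.mod_lt _ hp
    have hmul := Nat.mul_le_mul_right (10 ^ K) (show n / 10 ^ K + 1 ≤ lo / 10 ^ K from h)
    have hexp : (n / 10 ^ K + 1) * 10 ^ K = n / 10 ^ K * 10 ^ K + 10 ^ K := by ring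
    omega
  · exact absurd h h2
  · exact h

-- digit decomposition of a competitor n at its change position K
lemma n_split (lo n K : Nat) (h1 : n / 10 ^ (K + 1) = lo / 10 ^ (K + 1)) :
    n / 10 ^ K = PkN lo K * 10 + n / 10 ^ K % 10 := by
  unfold PkN
  rw [← h1]
  have h2 : n / 10 ^ (K + 1) = n / 10 ^ K / 10 := by
    rw [Nat.div_div_eq_div_mul, ← pow_succ]
  rw [h2]
  omega

lemma ge_res (t lo k n : Nat) (hmin : ∀ j < k, ¬ feasN t lo j) (hf : feasN t lo k)
    (hSD : SD n = t) (hgt : lo < n) : resN t lo k ≤ n := by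
  obtain ⟨K, hK1, hK2⟩ := exists_K lo n (by omega)
  have hKlt := K_gt lo n K hgt hK1 hK2
  have hp : (0:Nat) < 10 ^ K := pow_pos (by norm_num) _
  have hnd := n_split lo n K hK1
  have hld := lo_split lo K
  have hdig : n / 10 ^ K % 10 ≤ 9 := by omega
  have hdn : CkN lo K < n / 10 ^ K % 10 := by omega
  have hsp : SD n = SD (PkN lo K) + n / 10 ^ K % 10 + SD (n % 10 ^ K) := by
    have h3 : SD n = SD (n / 10 ^ K) + SD (n % 10 ^ K) := by
      conv_lhs => rw [show n = n / 10 ^ K * 10 ^ K + n % 10 ^ K from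
        (Nat.div_add_mod' n (10 ^ K)).symm]
      exact SD_split _ _ _ (Nat.mod_lt _ hp)
    have h4 : SD (n / 10 ^ K) = SD (PkN lo K) + n / 10 ^ K % 10 := by
      conv_lhs => rw [hnd]
      rw [SD_split10 _ _ hdig]
    omega
  have hmK : SD (n % 10 ^ K) ≤ 9 * K := SD_le _ _ (Nat.mod_lt _ hp)
  have hfK : feasN t lo K := ⟨by omega, by omega, by omega⟩
  have hKk : k ≤ K := by
    by_contra h
    push_neg at h
    exact hmin K h hfK
  obtain ⟨hres1, hres2, hres3⟩ := res_facts t lo k hf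
  rcases eq_or_lt_of_le hKk with heq | hKgt
  · subst heq
    have hd : dNf t lo k ≤ n / 10 ^ k % 10 := by
      unfold dNf
      omega
    rcases lt_or_eq_of_le hd with hdlt | hdeq
    · have hpre : PkN lo k * 10 + dNf t lo k + 1 ≤ n / 10 ^ k := by omega
      have hmul := Nat.mul_le_mul_right (10 ^ k) hpre
      have hexp : (PkN lo k * 10 + dNf t lo k + 1) * 10 ^ k
          = (PkN lo k * 10 + dNf t lo k) * 10 ^ k + 10 ^ k := by ring
      have ha := Nat.div_add_mod' n (10 ^ k)
      have hrem : remN t lo k ≤ 9 * k := by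
        obtain ⟨h8, hub, hlb⟩ := hf
        unfold remN dNf
        omega
      have htlt := tail_lt _ _ hrem
      unfold resN
      omega
    · have hremn : SD (n % 10 ^ k) = remN t lo k := by
        unfold remN
        omega
      have htail := tail_min (remN t lo k) (n % 10 ^ k) hremn
      have ha := Nat.div_add_mod' n (10 ^ k)
      have hqe : n / 10 ^ k * 10 ^ k = (PkN lo k * 10 + dNf t lo k) * 10 ^ k := by
        rw [hnd, hdeq]
      unfold resN
      omega
  · have hround := roundlem lo (k + 1) K hKgt
    have hnge : lo / 10 ^ K * 10 ^ K + 10 ^ K ≤ n := by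
      have hmul := Nat.mul_le_mul_right (10 ^ K) (show lo / 10 ^ K + 1 ≤ n / 10 ^ K from hKlt)
      have ha := Nat.div_add_mod' n (10 ^ K)
      have hexp : (lo / 10 ^ K + 1) * 10 ^ K = lo / 10 ^ K * 10 ^ K + 10 ^ K := by ring
      omega
    have hpk : PkN lo k * 10 ^ (k + 1) = lo / 10 ^ (k + 1) * 10 ^ (k + 1) := rfl
    omega

-- some feasible position exists (t ≥ 1)
lemma feas_exists (t lo : Nat) (ht : 1 ≤ t) : feasN t lo (lo + t + 1) := by
  have hbig : lo < 10 ^ (lo + t + 1) := lt_of_lt_of_le (Nat.lt_pow_self (by norm_num))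
    (Nat.pow_le_pow_right (by norm_num) (by omega))
  have hbig2 : lo < 10 ^ (lo + t + 1 + 1) := lt_of_lt_of_le hbig
    (Nat.pow_le_pow_right (by norm_num) (by omega))
  have hP : PkN lo (lo + t + 1) = 0 := Nat.div_eq_of_lt hbig2
  have hC : CkN lo (lo + t + 1) = 0 := by
    unfold CkN
    rw [Nat.div_eq_of_lt hbig]
  exact ⟨by omega, by rw [hP, SD_zero]; omega, by rw [hP, SD_zero]; omega⟩

-- the port's loop, run in the Nat model
lemma searchB_run (s : Int) (lo : Nat) (hs : 1 ≤ s)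
    (kst : Nat) (hfeas : feasN s.toNat lo kst) (hleast : ∀ j < kst, ¬ feasN s.toNat lo j) :
    ∀ (f : Nat) (k : Nat), k ≤ kst → kst - k < f →
      searchB f s ((lo : Nat) : Int) k = ((resN s.toNat lo kst : Nat) : Int) := by
  intro f
  induction f with
  | zero =>
    intro k h1 h2
    omega
  | succ f ih =>
    intro k h1 h2
    have hip1 : ((10:Int) ^ (k + 1)) = (((10:Nat) ^ (k + 1) : Nat) : Int) := by push_cast; ring
    have hip0 : ((10:Int) ^ k) = (((10:Nat) ^ k : Nat) : Int) := by push_cast; ring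
    have hfp : PySem.Int.floordiv ((lo : Nat) : Int) ((10:Int) ^ (k + 1)) = ((PkN lo k : Nat) : Int) := by
      rw [hip1]
      exact_mod_cast PySem.Int.floordiv_natCast lo (10 ^ (k + 1))
    have hfq : PySem.Int.floordiv ((lo : Nat) : Int) ((10:Int) ^ k) = ((lo / 10 ^ k : Nat) : Int) := by
      rw [hip0]
      exact_mod_cast PySem.Int.floordiv_natCast lo (10 ^ k)
    have hfc : PySem.Int.mod (((lo / 10 ^ k : Nat) : Nat) : Int) 10 = ((CkN lo k : Nat) : Int) := by
      exact_mod_cast PySem.Int.mod_natCast (lo / 10 ^ k) 10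
    simp only [searchB, hfp, hfq, hfc, digitSumB_cast]
    have hdmax : max (((CkN lo k : Nat) : Int) + 1) (s - ((SD (PkN lo k) : Nat) : Int) - 9 * (k : Int))
        = ((dNf s.toNat lo k : Nat) : Int) := by
      unfold dNf
      push_cast [Nat.cast_max]
      omega
    rw [hdmax]
    by_cases hk : k = kst
    · subst hk
      obtain ⟨h8, hub, hlb⟩ := hfeas
      rw [if_pos (by constructor <;> (unfold dNf; push_cast [Nat.cast_max]; omega))]
      have hrem : s - ((SD (PkN lo k) : Nat) : Int) - ((dNf s.toNat lo k : Nat) : Int)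
          = ((remN s.toNat lo k : Nat) : Int) := by
        unfold remN dNf
        push_cast [Nat.cast_max]
        omega
      rw [hrem]
      have hni : PySem.Int.floordiv ((remN s.toNat lo k : Nat) : Int) 9
          = ((remN s.toNat lo k / 9 : Nat) : Int) := by
        exact_mod_cast PySem.Int.floordiv_natCast (remN s.toNat lo k) 9
      rw [hni]
      simp only [Int.toNat_natCast]
      have hipn : ((10:Int) ^ (remN s.toNat lo k / 9)) = (((10:Nat) ^ (remN s.toNat lo k / 9) : Nat) : Int) := by
        push_cast; ring
      rw [hipn, hip0]
      have he1 : (((PkN lo k * 10 + dNf s.toNat lo k) * 10 ^ k : Nat) : Int)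
          = (((PkN lo k : Nat) : Int) * 10 + ((dNf s.toNat lo k : Nat) : Int)) * (((10:Nat) ^ k : Nat) : Int) := by
        push_cast; ring
      have he2 : (((remN s.toNat lo k - 9 * (remN s.toNat lo k / 9)) * 10 ^ (remN s.toNat lo k / 9) : Nat) : Int)
          = (((remN s.toNat lo k : Nat) : Int) - 9 * ((remN s.toNat lo k / 9 : Nat) : Int))
              * (((10:Nat) ^ (remN s.toNat lo k / 9) : Nat) : Int) := by
        push_cast [Nat.cast_sub (show 9 * (remN s.toNat lo k / 9) ≤ remN s.toNat lo k by omega)]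
        ring
      have h1 : (1:Nat) ≤ 10 ^ (remN s.toNat lo k / 9) := Nat.one_le_pow _ _ (by norm_num)
      unfold resN tailN
      omega
    · have hklt : k < kst := by omega
      have hnf := hleast k hklt
      rw [if_neg (by
        intro hcon
        apply hnf
        obtain ⟨hc1, hc2⟩ := hcon
        refine ⟨?_, ?_, ?_⟩ <;> (unfold dNf at hc1 hc2; push_cast [Nat.cast_max] at hc1 hc2; omega))]
      exact ih (k + 1) (by omega) (by omega)

-- fuel is large enough
lemma fuel_ge (s b : Int) (hs : 1 ≤ s) (ht : 1 ≤ s.toNat) :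
    NN s.toNat b.toNat ht + 1 ≤ 10 ^ (s.natAbs + b.natAbs + 2) := by
  have h1 := NN_bound s.toNat b.toNat ht
  have h2 : s.toNat = s.natAbs := by omega
  have h3 : b.toNat ≤ b.natAbs := by omega
  have h4 : s.toNat + b.toNat + 1 ≤ s.natAbs + b.natAbs + 2 := by omega
  have h5 : (10:Nat) ^ (s.toNat + b.toNat + 1) ≤ 10 ^ (s.natAbs + b.natAbs + 2) :=
    Nat.pow_le_pow_right (by norm_num) h4
  omega

lemma fuel_ge_t (s b : Int) : s.toNat ≤ 10 ^ (s.natAbs + b.natAbs + 2) := by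
  have h2 : s.toNat ≤ s.natAbs := by omega
  have h1 : s.natAbs < 10 ^ s.natAbs := Nat.lt_pow_self (by norm_num)
  have h5 : (10:Nat) ^ s.natAbs ≤ 10 ^ (s.natAbs + b.natAbs + 2) :=
    Nat.pow_le_pow_right (by norm_num) (by omega)
  omega

lemma fuel_ge_b (s b : Int) : b * 10 ≤ ((10 ^ (s.natAbs + b.natAbs + 2) : Nat) : Int) := by
  have h0 : b ≤ (b.natAbs : Int) := Int.le_natAbs
  have h1 : b.natAbs < 10 ^ b.natAbs := Nat.lt_pow_self (by norm_num)
  have h2 : (10:Nat) ^ b.natAbs * 10 ≤ 10 ^ (s.natAbs + b.natAbs + 2) := by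
    have : (10:Nat) ^ b.natAbs * 10 = 10 ^ (b.natAbs + 1) := (pow_succ 10 _).symm
    rw [this]
    exact Nat.pow_le_pow_right (by norm_num) (by omega)
  have h3 : (((10 ^ b.natAbs * 10 : Nat)) : Int) ≤ ((10 ^ (s.natAbs + b.natAbs + 2) : Nat) : Int) := by
    exact_mod_cast h2
  have h4 : (b.natAbs : Int) * 10 ≤ ((10 ^ b.natAbs : Nat) : Int) * 10 := by
    have : ((b.natAbs : Nat) : Int) ≤ ((10 ^ b.natAbs : Nat) : Int) := by exact_mod_cast h1.le
    nlinarith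
  have h5 : b ≤ |b| := le_abs_self b
  push_cast at h3 h4 ⊢
  linarith

lemma SD_one : SD 1 = 1 := by
  rw [SD_rec]
  norm_num [SD_zero]

-- A computes the least valid number for bigger = 0
lemma fdA_eq0 (s : Int) (hs : 1 ≤ s) (ht : 1 ≤ s.toNat) :
    first_digit s 0 = ((NN s.toNat 0 ht : Nat) : Int) := by
  rw [first_digit, dif_neg (by simp)]
  have h := outerA_run s 0 hs ht (fuelA s 0) (fuelA s 0) 0 (fun i _ => dvd_zero _) (Nat.zero_le _) ?_ ?_
  · simpa using h
  · have := fuel_ge s 0 hs ht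
    unfold fuelA
    simp only [Int.toNat_zero] at this ⊢
    simp only [Int.natAbs_zero] at this ⊢
    omega
  · have := fuel_ge_t s 0
    unfold fuelA
    omega

-- A computes the least valid number (s ≥ 1)
lemma fdA_eq (s b : Int) (hs : 1 ≤ s) (ht : 1 ≤ s.toNat) :
    first_digit s b = ((NN s.toNat b.toNat ht : Nat) : Int) := by
  by_cases hb : b = 0
  · subst hb
    exact fdA_eq0 s hs ht
  · rw [first_digit, dif_pos hb]
    show outerA (fuelA s b) (fuelA s b) s b
        (if s = 1 then scale2A (fuelA s b) b (scale1A (fuelA s b) b (first_digit s 0))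
         else scale1A (fuelA s b) b (first_digit s 0)) = _
    rw [fdA_eq0 s hs ht]
    have hN0spec := NN_spec s.toNat 0 ht
    have hN0pos : 1 ≤ NN s.toNat 0 ht := by
      rcases Nat.eq_zero_or_pos (NN s.toNat 0 ht) with h | h
      · exfalso
        have := hN0spec.1
        rw [h, SD_zero] at this
        omega
      · exact h
    have hNspec := NN_spec s.toNat b.toNat ht
    have hfb : b * 10 ≤ ((fuelA s b : Nat) : Int) := by
      unfold fuelA
      exact fuel_ge_b s b
    have hF0 : (0:Int) ≤ ((fuelA s b : Nat) : Int) := by positivity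
    have hfuelb : b - ((NN s.toNat 0 ht : Nat) : Int) ≤ ((fuelA s b : Nat) : Int) := by
      omega
    obtain ⟨j, hj1, hj2, hj3⟩ := scale1A_run b (fuelA s b) ((NN s.toNat 0 ht : Nat) : Int)
      (by exact_mod_cast hN0pos) hfuelb
    rw [hj1]
    have hr2cast : ((NN s.toNat 0 ht : Nat) : Int) * 10 ^ j = ((NN s.toNat 0 ht * 10 ^ j : Nat) : Int) := by
      push_cast; ring
    have hNb : b ≤ ((NN s.toNat b.toNat ht : Nat) : Int) := by
      have h2 := hNspec.2
      omega
    have hr2N : NN s.toNat 0 ht * 10 ^ j ≤ NN s.toNat b.toNat ht := by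
      rcases hj3 with h0 | hle
      · subst h0
        simpa using NN_min s.toNat 0 ht ⟨hNspec.1, Nat.zero_le _⟩
      · have hx : ((NN s.toNat 0 ht * 10 ^ j : Nat) : Int) ≤ ((NN s.toNat b.toNat ht : Nat) : Int) := by
          rw [← hr2cast]
          omega
        exact_mod_cast hx
    have hSD2 : SD (NN s.toNat 0 ht * 10 ^ j) = s.toNat := by
      rw [SD_mul_pow, hN0spec.1]
    have hINV2 : INVr s (NN s.toNat 0 ht * 10 ^ j) := by
      apply INV_of_not_cond0
      unfold condI
      have h0 : NN s.toNat 0 ht * 10 ^ j + 10 ^ 0 - 1 = NN s.toNat 0 ht * 10 ^ j := by norm_num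
      rw [h0, hSD2]
      omega
    have hfuelN : NN s.toNat b.toNat ht + 1 - (NN s.toNat 0 ht * 10 ^ j) ≤ fuelA s b := by
      have := fuel_ge s b hs ht
      unfold fuelA
      omega
    have hfit : s.toNat ≤ fuelA s b := fuel_ge_t s b
    by_cases hs1 : s = 1
    · rw [if_pos hs1]
      have hN01 : NN s.toNat 0 ht = 1 := by
        refine le_antisymm (NN_min s.toNat 0 ht ⟨?_, Nat.zero_le _⟩) hN0pos
        rw [SD_one, hs1]
        rfl
      rw [hN01]
      simp only [Nat.cast_one, one_mul]
      have h10j : (1:Int) ≤ 10 ^ j := one_le_pow₀ (by norm_num)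
      obtain ⟨j2, hk1, hk2, hk3⟩ := scale2A_run b (fuelA s b) ((10:Int) ^ j) h10j
        (by omega)
      rw [hk1]
      have hcast3 : (10:Int) ^ j * 10 ^ j2 = (((10:Nat) ^ (j + j2) : Nat) : Int) := by
        push_cast
        rw [pow_add]
      rw [hcast3]
      have hSD3 : SD (10 ^ (j + j2)) = s.toNat := by
        have h1 : (10:Nat) ^ (j + j2) = 1 * 10 ^ (j + j2) := (one_mul _).symm
        rw [h1, SD_mul_pow, SD_one, hs1]
        rfl
      have hr3N : 10 ^ (j + j2) ≤ NN s.toNat b.toNat ht := by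
        rcases hk3 with h0 | hle2
        · subst h0
          have := hr2N
          rw [hN01, one_mul] at this
          simpa using this
        · obtain ⟨u, hu⟩ := SD_eq_one (NN s.toNat b.toNat ht) (by
            have := hNspec.1
            omega)
          rw [hcast3] at hle2
          have hlt : (((10:Nat) ^ (j + j2) : Nat) : Int) < ((NN s.toNat b.toNat ht : Nat) : Int) * 10 := by
            omega
          have hN10 : ((NN s.toNat b.toNat ht : Nat) : Int) * 10 = (((10:Nat) ^ (u + 1) : Nat) : Int) := by
            rw [hu]
            push_cast
            rw [pow_succ]
          rw [hN10] at hlt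
          have hltN : (10:Nat) ^ (j + j2) < 10 ^ (u + 1) := by exact_mod_cast hlt
          have hexp : j + j2 < u + 1 := by
            by_contra hcon
            push_neg at hcon
            exact absurd (Nat.pow_le_pow_right (by norm_num : 0 < 10) hcon) (by omega)
          calc (10:Nat) ^ (j + j2) ≤ 10 ^ u := Nat.pow_le_pow_right (by norm_num : 0 < 10) (by omega)
          _ = NN s.toNat b.toNat ht := hu.symm
      have hINV3 : INVr s (10 ^ (j + j2)) := by
        apply INV_of_not_cond0
        unfold condI
        have h0 : (10:Nat) ^ (j + j2) + 10 ^ 0 - 1 = 10 ^ (j + j2) := by norm_num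
        rw [h0, hSD3]
        omega
      exact outerA_run s b hs ht (fuelA s b) (fuelA s b) (10 ^ (j + j2)) hINV3 hr3N
        (by
          have h1 := fuel_ge s b hs ht
          have h2 : NN s.toNat b.toNat ht + 1 - 10 ^ (j + j2) ≤ NN s.toNat b.toNat ht + 1 :=
            Nat.sub_le _ _
          unfold fuelA
          exact le_trans h2 h1) hfit
    · rw [if_neg hs1, hr2cast]
      exact outerA_run s b hs ht (fuelA s b) (fuelA s b) _ hINV2 hr2N hfuelN hfit

-- B computes the least valid number (s ≥ 1)
lemma fdB_eq (s b : Int) (hs : 1 ≤ s) (ht : 1 ≤ s.toNat) :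
    first_digit_alt s b = ((NN s.toNat b.toNat ht : Nat) : Int) := by
  simp only [first_digit_alt]
  have hlo : (if b > 0 then b else 0) = ((b.toNat : Nat) : Int) := by
    split_ifs with h <;> omega
  rw [hlo, digitSumB_cast]
  by_cases hsd : SD b.toNat = s.toNat
  · rw [if_pos (by omega)]
    have hNN : NN s.toNat b.toNat ht = b.toNat :=
      le_antisymm (NN_min _ _ _ ⟨hsd, le_rfl⟩) (NN_spec _ _ _).2
    rw [hNN]
  · rw [if_neg (by omega)]
    have hdec : DecidablePred (fun k => feasN s.toNat b.toNat k) := by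
      intro k
      unfold feasN
      infer_instance
    have hex : ∃ k, feasN s.toNat b.toNat k := ⟨b.toNat + s.toNat + 1, feas_exists _ _ ht⟩
    have hfeas := @Nat.find_spec _ hdec hex
    have hleast : ∀ j < @Nat.find _ hdec hex, ¬ feasN s.toNat b.toNat j :=
      fun j hj => @Nat.find_min _ hdec hex j hj
    have hkb : @Nat.find _ hdec hex ≤ b.toNat + s.toNat + 1 :=
      @Nat.find_min' _ hdec hex _ (feas_exists _ _ ht)
    obtain ⟨hr1, hr2, _⟩ := res_facts s.toNat b.toNat _ hfeas
    have hNN : NN s.toNat b.toNat ht = resN s.toNat b.toNat (@Nat.find _ hdec hex) := by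
      refine le_antisymm (NN_min _ _ _ ⟨hr1, by omega⟩) ?_
      have hspec := NN_spec s.toNat b.toNat ht
      have hno : NN s.toNat b.toNat ht ≠ b.toNat := by
        intro h
        rw [h] at hspec
        exact hsd hspec.1
      exact ge_res _ _ _ _ hleast hfeas hspec.1 (by omega)
    rw [hNN]
    apply searchB_run s b.toNat hs _ hfeas hleast _ 0 (Nat.zero_le _)
    have hX : s.natAbs + b.natAbs + 2 < 10 ^ (s.natAbs + b.natAbs + 2) :=
      Nat.lt_pow_self (by norm_num)
    omega

-- the s = 0, b ≤ 0 corner: both return 0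
lemma sumA_zero : sumAllDigitsA 0 = 0 := by
  have := sumA_cast 0
  simpa [SD_zero] using this

lemma fdA_zero0 : first_digit 0 0 = 0 := by
  rw [first_digit, dif_neg (by simp)]
  obtain ⟨f', hf⟩ : ∃ f', fuelA 0 0 = f' + 1 :=
    ⟨fuelA 0 0 - 1, by have : 0 < fuelA 0 0 := pow_pos (by norm_num) _; omega⟩
  rw [hf]
  simp only [outerA]
  rw [if_neg (by simp [sumA_zero])]

lemma fdA_zero (b : Int) (hb : b ≤ 0) : first_digit 0 b = 0 := by
  by_cases hb0 : b = 0
  · subst hb0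
    exact fdA_zero0
  · rw [first_digit, dif_pos hb0]
    show outerA (fuelA 0 b) (fuelA 0 b) 0 b
        (if (0:Int) = 1 then scale2A (fuelA 0 b) b (scale1A (fuelA 0 b) b (first_digit 0 0))
         else scale1A (fuelA 0 b) b (first_digit 0 0)) = 0
    rw [if_neg (by norm_num), fdA_zero0]
    obtain ⟨f', hf⟩ : ∃ f', fuelA 0 b = f' + 1 :=
      ⟨fuelA 0 b - 1, by have : 0 < fuelA 0 b := pow_pos (by norm_num) _; omega⟩
    rw [hf]
    simp only [scale1A]
    rw [if_neg (by omega)]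
    simp only [outerA]
    rw [if_neg (by simp [sumA_zero]; omega)]

lemma fdB_zero (b : Int) (hb : b ≤ 0) : first_digit_alt 0 b = 0 := by
  simp only [first_digit_alt]
  have hlo : (if b > 0 then b else 0) = (0:Int) := by
    split_ifs with h <;> omega
  rw [hlo]
  have hd0 : digitSumB 0 = 0 := by
    have := digitSumB_cast 0
    simpa [SD_zero] using this
  rw [if_pos hd0]

-- ===== VERDICT (by name: the statement is the Claim_ definition above) =====
theorem first_digit_spec : Claim_equal_first_digit := by
  intro s b _hdom hpre
  unfold Spec_first_digit
  rcases hpre with hs | ⟨hs0, hb⟩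
  · have ht : 1 ≤ s.toNat := by omega
    rw [fdA_eq s b hs ht, fdB_eq s b hs ht]
  · subst hs0
    rw [fdA_zero b hb, fdB_zero b hb]
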